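-- pv_equiv track=rewrite | github.com/inakirzabalegui/Local_PDF_Album_Generator | src/render/layout.py | _all_partitions
-- ===== SOURCE A (Python) =====
-- from itertools import combinations
--
-- def _all_partitions(n: int, num_groups: int) -> list[list[tuple[int, int]]]:
--     """Return all ways to split n ordered items into num_groups non-empty groups.
--
--     Each partition is a list of (start, end) index pairs (end is exclusive).
--     Uses combinatorial split-point enumeration: C(n-1, num_groups-1) partitions.
--
--     For n=10, num_groups=4 → C(9,3)=84 partitions. Total across 1–4 groups: ~130.
--     """
--     if num_groups == 1:
--         return [[(0, n)]]
--     if num_groups >= n: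
--         # One item per group
--         return [[(i, i + 1) for i in range(n)]]
--
--     result = []
--     for splits in combinations(range(1, n), num_groups - 1):
--         boundaries = [0] + list(splits) + [n]
--         partition = [(boundaries[i], boundaries[i + 1]) for i in range(num_groups)]
--         result.append(partition)
--     return result
-- ===== SOURCE B (Python) =====
-- def _all_partitions(n: int, num_groups: int) -> list[list[tuple[int, int]]]:
--     """Recursive enumeration of compositions of n indices into num_groups ranges."""
--     if num_groups == 1:
--         return [[(0, n)]]
--     if num_groups >= n:
--         # One item per group
--         return [[(i, i + 1) for i in range(n)]]
--
--     def rec(start: int, remaining: int) -> list[list[tuple[int, int]]]: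
--         if remaining == 1:
--             return [[(start, n)]]
--         out = []
--         for size in range(1, n - start - remaining + 2):
--             for rest in rec(start + size, remaining - 1):
--                 out.append([(start, start + size)] + rest)
--         return out
--
--     return rec(0, num_groups)
-- ===== Notes on version B (the rewrite author's own statement) =====
-- stated objective: alternative
-- what changed: Replaces itertools.combinations split-point enumeration plus boundary-list indexing by a direct recursion on (start, remaining_groups) that emits each range as it is chosen, keeping A's two guard clauses.
import Mathlib
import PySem

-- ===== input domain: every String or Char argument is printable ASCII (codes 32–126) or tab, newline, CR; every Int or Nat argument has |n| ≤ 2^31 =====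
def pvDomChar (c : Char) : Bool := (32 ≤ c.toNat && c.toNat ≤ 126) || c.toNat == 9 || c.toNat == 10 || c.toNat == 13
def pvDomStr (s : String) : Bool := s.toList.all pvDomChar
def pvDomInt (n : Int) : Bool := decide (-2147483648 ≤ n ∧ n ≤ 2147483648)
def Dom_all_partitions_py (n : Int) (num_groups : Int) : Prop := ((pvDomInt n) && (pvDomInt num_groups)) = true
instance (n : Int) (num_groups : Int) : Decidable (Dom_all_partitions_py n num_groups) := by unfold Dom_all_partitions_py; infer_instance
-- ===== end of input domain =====

-- B replaces the combinations-of-split-points enumeration by a direct recursion on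
-- (start, remaining groups); same output, same cost (objective: alternative).

-- ===== PORT A =====
-- itertools.combinations(xs, k) in lexicographic order (exact port of its semantics on a list)
def pyCombos : Nat → List Int → List (List Int)
  | 0, _ => [[]]
  | _+1, [] => []
  | k+1, x :: rest => (pyCombos k rest).map (x :: ·) ++ pyCombos (k+1) rest

def all_partitions_py (n : Int) (num_groups : Int) : List (List (Int × Int)) :=
  if num_groups = 1 then [[(0, n)]]
  else if num_groups ≥ n then [(PySem.List.pyRange 0 n 1).map (fun i => (i, i + 1))]
  else
    -- for splits in combinations(range(1, n), num_groups - 1): … result.append(partition)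
    -- (num_groups - 1).toNat: Python raises ValueError for a negative r; Pre_ excludes that.
    (pyCombos (num_groups - 1).toNat (PySem.List.pyRange 1 n 1)).foldl
      (fun result splits =>
        let boundaries : List Int := 0 :: (splits ++ [n])
        let partition := (PySem.List.pyRange 0 num_groups 1).map
          (fun i => (PySem.List.pyGetD boundaries i 0, PySem.List.pyGetD boundaries (i + 1) 0))
        result ++ [partition]) []

-- ===== PORT B =====
-- rec(start, remaining); remaining is a Nat here (the call below passes num_groups.toNat;
-- inside the branch num_groups ≥ 2, so this is exact); the 0 case is unreachable.
def altRec (n : Int) : Int → Nat → List (List (Int × Int))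
  | _, 0 => []
  | start, 1 => [[(start, n)]]
  | start, (k+2) =>
      (PySem.List.pyRange 1 (n - start - ((k : Int) + 2) + 2) 1).foldl
        (fun out size =>
          (altRec n (start + size) (k+1)).foldl
            (fun out2 rest => out2 ++ [(start, start + size) :: rest]) out) []

def all_partitions_py_alt (n : Int) (num_groups : Int) : List (List (Int × Int)) :=
  if num_groups = 1 then [[(0, n)]]
  else if num_groups ≥ n then [(PySem.List.pyRange 0 n 1).map (fun i => (i, i + 1))]
  else altRec n 0 num_groups.toNat

-- ===== PRECONDITION & SPEC =====
-- Pre_ excludes exactly the inputs where A raises: num_groups < 1 together with num_groups < n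
-- makes combinations(…, num_groups - 1) raise ValueError (negative r).
def Pre_all_partitions_py (n : Int) (num_groups : Int) : Prop := 1 ≤ num_groups ∨ n ≤ num_groups
instance (n : Int) (num_groups : Int) : Decidable (Pre_all_partitions_py n num_groups) := by unfold Pre_all_partitions_py; infer_instance
def pvWitness_all_partitions_py : Int × Int := (5, 3)

def Spec_all_partitions_py (n : Int) (num_groups : Int) (out : List (List (Int × Int))) : Prop := out = all_partitions_py_alt n num_groups
instance (n : Int) (num_groups : Int) (out : List (List (Int × Int))) : Decidable (Spec_all_partitions_py n num_groups out) := by unfold Spec_all_partitions_py; infer_instance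

-- ===== CLAIM (what is proved, stated in full; the proofs are below) =====
def Claim_equal_all_partitions_py : Prop := ∀ (n : Int) (num_groups : Int), Dom_all_partitions_py n num_groups → Pre_all_partitions_py n num_groups → Spec_all_partitions_py n num_groups (all_partitions_py n num_groups)

-- ===== LEMMAS AND PROOFS =====

-- consecutive pairs of a boundary list: the partition a splits list denotes
def zipPairs : List Int → List (Int × Int)
  | a :: b :: t => (a, b) :: zipPairs (b :: t)
  | _ => []

theorem foldl_app_eq_map {α β : Type} (f : α → β) (l : List α) (acc : List β) :
    l.foldl (fun r s => r ++ [f s]) acc = acc ++ l.map f := by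
  induction l generalizing acc with
  | nil => simp
  | cons x xs ih => simp [List.foldl, ih]

theorem foldl_flat {α β : Type} (h : α → List β) (l : List α) (acc : List β) :
    l.foldl (fun r s => r ++ h s) acc = acc ++ l.flatMap h := by
  induction l generalizing acc with
  | nil => simp
  | cons x xs ih => simp [List.foldl, ih]

theorem altRec_flat (n start : Int) (k : Nat) :
    altRec n start (k+2) =
      (PySem.List.pyRange 1 (n - start - ((k : Int) + 2) + 2) 1).flatMap
        (fun size => (altRec n (start + size) (k+1)).map
          (fun rest => (start, start + size) :: rest)) := by
  show (PySem.List.pyRange 1 (n - start - ((k : Int) + 2) + 2) 1).foldl _ [] = _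
  simp only [foldl_app_eq_map]
  rw [foldl_flat]
  simp

theorem pyCombos_nil_of_short (k : Nat) (L : List Int) (h : L.length < k) :
    pyCombos k L = [] := by
  induction L generalizing k with
  | nil =>
    cases k with
    | zero => omega
    | succ k => rfl
  | cons x rest ih =>
    cases k with
    | zero => omega
    | succ k =>
      simp only [pyCombos]
      rw [ih k (by simp at h; omega), ih (k+1) (by simp at h ⊢; omega)]
      simp

theorem length_mem_pyCombos (k : Nat) (L : List Int) (xs : List Int) (h : xs ∈ pyCombos k L) :
    xs.length = k := by
  induction L generalizing k xs with
  | nil =>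
    cases k with
    | zero => simp [pyCombos] at h; simp [h]
    | succ k => simp [pyCombos] at h
  | cons x rest ih =>
    cases k with
    | zero => simp [pyCombos] at h; simp [h]
    | succ k =>
      simp only [pyCombos, List.mem_append, List.mem_map] at h
      rcases h with ⟨ys, hy, rfl⟩ | h
      · simpa using ih k ys hy
      · exact ih (k+1) xs h

-- boundary-indexed comprehension = consecutive pairs (Nat-index form)
theorem zip_of_indexed (bs : List Int) (m : Nat) (h : bs.length = m + 1) :
    (List.range m).map (fun k => (bs.getD k 0, bs.getD (k+1) 0)) = zipPairs bs := by
  induction bs generalizing m with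
  | nil => simp at h
  | cons a rest ih =>
    cases rest with
    | nil =>
      have : m = 0 := by simpa using h
      subst this; simp [zipPairs]
    | cons b t =>
      have hm : m = t.length + 1 := by simp at h; omega
      subst hm
      rw [List.range_succ_eq_map]
      simp only [List.map_cons, List.map_map]
      simp only [zipPairs]
      congr 1
      rw [← ih (t.length) (by simp)]
      apply List.map_congr_left
      intro k _
      simp [List.getD]

-- the same with Python's int-indexed range/getD, as A's comprehension writes it
theorem zip_of_indexed_py (bs : List Int) (g : Int) (hg : 0 ≤ g) (h : bs.length = g.toNat + 1) :
    (PySem.List.pyRange 0 g 1).map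
      (fun i => (PySem.List.pyGetD bs i 0, PySem.List.pyGetD bs (i + 1) 0)) = zipPairs bs := by
  rw [PySem.List.pyRange_one]
  have h0 : (g - 0).toNat = g.toNat := by omega
  rw [h0, List.map_map]
  rw [← zip_of_indexed bs g.toNat h]
  apply List.map_congr_left
  intro k _
  have h1 : ((0 : Int) + (k : Int)) = (k : Int) := by omega
  have h2 : ((k : Int) + 1) = ((k + 1 : Nat) : Int) := by push_cast; ring
  simp only [Function.comp, h1, h2, PySem.List.pyGetD_natCast]

-- combinations of a range, peeled by its first element
theorem pyCombos_range_peel (k : Nat) (b : Int) (a : Int) :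
    pyCombos (k+1) (PySem.List.pyRange a b 1) =
      (PySem.List.pyRange a (b - k) 1).flatMap
        (fun s => (pyCombos k (PySem.List.pyRange (s+1) b 1)).map (s :: ·)) := by
  have main : ∀ (m : Nat) (a : Int), (b - a).toNat = m →
      pyCombos (k+1) (PySem.List.pyRange a b 1) =
        (PySem.List.pyRange a (b - k) 1).flatMap
          (fun s => (pyCombos k (PySem.List.pyRange (s+1) b 1)).map (s :: ·)) := by
    intro m
    induction m with
    | zero =>
      intro a hm
      rw [PySem.List.pyRange_one_eq_nil (by omega : b ≤ a),
          PySem.List.pyRange_one_eq_nil (by omega : b - (k : Int) ≤ a)]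
      rfl
    | succ m ih =>
      intro a hm
      have hab : a < b := by omega
      rw [PySem.List.pyRange_one_cons hab]
      simp only [pyCombos]
      rw [ih (a+1) (by omega)]
      by_cases hc : a < b - k
      · rw [PySem.List.pyRange_one_cons hc]
        simp [List.flatMap_cons]
      · rw [PySem.List.pyRange_one_eq_nil (show b - (k : Int) ≤ a by omega),
            PySem.List.pyRange_one_eq_nil (show b - (k : Int) ≤ a + 1 by omega)]
        have hnil : pyCombos k (PySem.List.pyRange (a+1) b 1) = [] := by
          apply pyCombos_nil_of_short
          rw [PySem.List.length_pyRange_one]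
          omega
        simp [hnil]
  exact main ((b - a).toNat) a rfl

theorem main_rec (n : Int) (k : Nat) : ∀ (start : Int),
    (pyCombos k (PySem.List.pyRange (start + 1) n 1)).map
        (fun splits => zipPairs (start :: (splits ++ [n]))) = altRec n start (k+1) := by
  induction k with
  | zero =>
    intro start
    simp [pyCombos, altRec, zipPairs]
  | succ k ih =>
    intro start
    rw [pyCombos_range_peel, altRec_flat, List.map_flatMap]
    have harg : n - start - ((k : Int) + 2) + 2 = n - (k : Int) - start := by ring
    rw [harg]
    rw [PySem.List.pyRange_one (start+1) (n - (k : Int)),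
        PySem.List.pyRange_one 1 (n - (k : Int) - start)]
    have hlen : (n - (k : Int) - (start + 1)).toNat = (n - (k : Int) - start - 1).toNat := by omega
    rw [hlen, List.flatMap_map, List.flatMap_map]
    congr 1
    funext j
    have hs : start + (1 + (j : Int)) = start + 1 + (j : Int) := by ring
    rw [hs, ← ih (start + 1 + (j : Int))]
    simp only [List.map_map]
    apply List.map_congr_left
    intro splits _
    rfl

-- ===== VERDICT (by name: the statement is the Claim_ definition above) =====
theorem all_partitions_py_spec : Claim_equal_all_partitions_py := by
  intro n g _dom pre
  unfold Spec_all_partitions_py all_partitions_py all_partitions_py_alt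
  by_cases h1 : g = 1
  · simp [h1]
  · by_cases h2 : g ≥ n
    · simp [h1, h2]
    · simp only [h1, h2, if_false]
      have hg2 : 2 ≤ g := by
        rcases pre with hp | hp
        · omega
        · omega
      set k : Nat := (g - 1).toNat with hk
      have hgk : g.toNat = k + 1 := by omega
      rw [foldl_app_eq_map (fun splits =>
        (PySem.List.pyRange 0 g 1).map
          (fun i => (PySem.List.pyGetD (0 :: (splits ++ [n])) i 0,
                     PySem.List.pyGetD (0 :: (splits ++ [n])) (i + 1) 0)))]
      rw [List.nil_append, hgk]
      rw [← main_rec n k 0]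
      have h01 : (0 : Int) + 1 = 1 := by norm_num
      rw [h01]
      apply List.map_congr_left
      intro splits hmem
      have hlen : splits.length = k := length_mem_pyCombos _ _ _ hmem
      exact zip_of_indexed_py (0 :: (splits ++ [n])) g (by omega)
        (by simp [hlen]; omega)
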